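-- pv_equiv track=rewrite | github.com/watagashi0619/discord_bot | discord_bot/gpt/gptbot.py | fix_title_capitalization
-- ===== SOURCE A (Python) =====
-- def fix_title_capitalization(title: str):
--     # 小文字で残す単語のリスト
--     minor_words = {
--         "a",
--         "an",
--         "the",
--         "and",
--         "but",
--         "or",
--         "for",
--         "nor",
--         "on",
--         "at",
--         "to",
--         "by",
--         "with",
--         "in",
--         "of",
--         "up",
--         "out",
--         "as",
--     }
--
--     # タイトルをすべて小文字にしたあと単語に分割
--     words = title.lower().split()
--
--     # 最初と最後の単語は必ず大文字から始める
--     capitalized_title = [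
--         word.capitalize() if i == 0 or i == len(words) - 1 else (word if word in minor_words else word.capitalize())
--         for i, word in enumerate(words)
--     ]
--
--     # 結果を結合して新しいタイトルとして返す
--     return " ".join(capitalized_title)
-- ===== SOURCE B (Python) =====
-- def fix_title_capitalization(title: str):
--     minor_words = {
--         "a", "an", "the", "and", "but", "or", "for", "nor", "on", "at",
--         "to", "by", "with", "in", "of", "up", "out", "as",
--     }
--
--     def render(ws):
--         # ws is nonempty and holds every word after the first: demote minor
--         # words except the final one, which is always capitalized.
--         if len(ws) == 1:
--             return ws[0].capitalize()
--         head = ws[0] if ws[0] in minor_words else ws[0].capitalize()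
--         return head + " " + render(ws[1:])
--
--     words = title.lower().split()
--     if not words:
--         return ""
--     if len(words) == 1:
--         return words[0].capitalize()
--     return words[0].capitalize() + " " + render(words[1:])
-- ===== Notes on version B (the rewrite author's own statement) =====
-- stated objective: alternative
-- what changed: Instead of mapping an index-aware conditional comprehension over the words and joining, B builds the output string back-to-front: it starts from the capitalized last word and walks the interior words in reverse, prepending each (demoted if minor) with a space via string concatenation; no parts list, no join, no index tests.
import Mathlib
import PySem

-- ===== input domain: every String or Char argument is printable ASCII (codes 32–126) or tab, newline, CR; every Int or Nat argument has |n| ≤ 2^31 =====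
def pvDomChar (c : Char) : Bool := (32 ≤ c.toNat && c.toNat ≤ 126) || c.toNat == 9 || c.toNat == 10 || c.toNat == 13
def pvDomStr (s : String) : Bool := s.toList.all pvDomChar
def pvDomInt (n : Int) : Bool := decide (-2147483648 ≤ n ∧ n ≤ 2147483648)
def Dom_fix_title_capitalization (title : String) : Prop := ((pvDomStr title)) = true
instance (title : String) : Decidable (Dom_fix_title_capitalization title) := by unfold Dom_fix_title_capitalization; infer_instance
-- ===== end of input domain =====

-- B builds the result string back-to-front with a string accumulator (no parts list, no join, no index tests); same cost class as A ("alternative").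

-- ===== PORT A =====
-- Python str.capitalize(): first char uppercased, rest lowercased (exact on ASCII)
def pvCapChars : List Char → List Char
  | [] => []
  | c :: cs => PySem.Chars.upperChar c :: PySem.Chars.lower cs

def pvCap (w : String) : String := String.ofList (pvCapChars w.toList)

def pvMinorWords : PySem.Set String :=
  PySem.Set.ofList ["a", "an", "the", "and", "but", "or", "for", "nor", "on", "at",
                    "to", "by", "with", "in", "of", "up", "out", "as"]

def fix_title_capitalization (title : String) : String :=
  let words := PySem.Str.split₀ (PySem.Str.lower title)
  let capitalized_title :=
    (PySem.List.enumerate words 0).map (fun iw =>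
      if iw.1 = 0 ∨ iw.1 = (words.length : Int) - 1 then pvCap iw.2
      else if PySem.Set.contains pvMinorWords iw.2 then iw.2 else pvCap iw.2)
  PySem.Str.join " " capitalized_title

-- ===== PORT B =====
-- strings are built as char lists (Lean's String.append is opaque to the kernel); exact concatenation
def pvDemote (w : String) : List Char :=
  if PySem.Set.contains pvMinorWords w then w.toList else pvCapChars w.toList

def fix_title_capitalization_alt (title : String) : String :=
  let words := PySem.Str.split₀ (PySem.Str.lower title)
  if words = [] then ""
  else
    -- start from the last word (always capitalized) and prepend going left
    let acc0 := pvCapChars (PySem.List.pyGetD words (-1) "").toList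
    let acc := ((PySem.List.slice words (some 1) (some (-1))).reverse).foldl
        (fun acc w => pvDemote w ++ ' ' :: acc) acc0
    if 1 < words.length then
      String.ofList (pvCapChars (PySem.List.pyGetD words 0 "").toList ++ ' ' :: acc)
    else String.ofList acc

-- ===== PRECONDITION & SPEC =====
def Spec_fix_title_capitalization (title : String) (out : String) : Prop := out = fix_title_capitalization_alt title
instance (title : String) (out : String) : Decidable (Spec_fix_title_capitalization title out) := by unfold Spec_fix_title_capitalization; infer_instance

-- ===== CLAIM =====
def Claim_equal_fix_title_capitalization : Prop := ∀ (title : String), Dom_fix_title_capitalization title → Spec_fix_title_capitalization title (fix_title_capitalization title)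

-- ===== LEMMAS AND PROOFS =====

-- the interior+last part of A's comprehension, stated structurally
def pvMid : List String → List String
  | [] => []
  | [w] => [pvCap w]
  | w :: x :: r => (if PySem.Set.contains pvMinorWords w then w else pvCap w) :: pvMid (x :: r)

theorem pvMid_eq (total : Int) : ∀ (ws : List String) (n : Int), 1 ≤ n → total = n + ws.length →
    (PySem.List.enumerate ws n).map (fun iw =>
      if iw.1 = 0 ∨ iw.1 = total - 1 then pvCap iw.2
      else if PySem.Set.contains pvMinorWords iw.2 then iw.2 else pvCap iw.2) = pvMid ws := by
  intro ws
  induction ws with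
  | nil => intro n _ _; rfl
  | cons w ws ih =>
    intro n hn htot
    rw [PySem.List.enumerate_cons, List.map_cons]
    cases ws with
    | nil =>
      simp only [List.length_cons, List.length_nil] at htot
      rw [if_pos (by omega)]
      rfl
    | cons x r =>
      simp only [List.length_cons] at htot
      rw [if_neg (by push_cast at htot ⊢; omega)]
      rw [ih (n + 1) (by omega) (by simp only [List.length_cons] at htot ⊢; push_cast at htot ⊢; omega)]
      rfl

theorem pvAList_eq (w : String) (ws : List String) :
    (PySem.List.enumerate (w :: ws) 0).map (fun iw =>
      if iw.1 = 0 ∨ iw.1 = ((w :: ws).length : Int) - 1 then pvCap iw.2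
      else if PySem.Set.contains pvMinorWords iw.2 then iw.2 else pvCap iw.2)
    = pvCap w :: pvMid ws := by
  rw [PySem.List.enumerate_cons, List.map_cons, if_pos (Or.inl rfl)]
  congr 1
  exact pvMid_eq _ ws 1 le_rfl (by simp; ring)

theorem pvMid_ne_nil (x : String) (r : List String) : pvMid (x :: r) ≠ [] := by
  cases r <;> simp [pvMid]

theorem pvJoin_mid : ∀ (ws : List String) (h : ws ≠ []),
    PySem.Chars.join [' '] ((pvMid ws).map String.toList)
      = ws.dropLast.foldr (fun w acc => pvDemote w ++ ' ' :: acc)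
          (pvCapChars (ws.getLast h).toList) := by
  intro ws
  induction ws with
  | nil => intro h; exact absurd rfl h
  | cons w ws ih =>
    intro _
    cases ws with
    | nil => simp [pvMid, PySem.Chars.join_singleton, pvCap]
    | cons x r =>
      rw [show pvMid (w :: x :: r)
            = (if PySem.Set.contains pvMinorWords w then w else pvCap w) :: pvMid (x :: r) from rfl]
      rw [List.map_cons]
      obtain ⟨y, ys, hy⟩ := List.exists_cons_of_ne_nil (pvMid_ne_nil x r)
      rw [hy, List.map_cons, PySem.Chars.join_cons_cons, ← List.map_cons, ← hy]
      rw [ih (by simp)]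
      rw [show (w :: x :: r).dropLast = w :: (x :: r).dropLast by simp]
      rw [List.foldr_cons]
      rw [show (w :: x :: r).getLast (by simp) = (x :: r).getLast (by simp) by
        exact List.getLast_cons (by simp)]
      unfold pvDemote
      split
      · simp
      · simp [pvCap]

theorem pvSlice_one_negone (w x : String) (r : List String) :
    PySem.List.slice (w :: x :: r) (some 1) (some (-1)) = (x :: r).dropLast := by
  simp [PySem.List.slice, List.dropLast_eq_take]

-- ===== VERDICT =====
theorem fix_title_capitalization_spec : Claim_equal_fix_title_capitalization := by
  intro title _
  show fix_title_capitalization title = fix_title_capitalization_alt title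
  unfold fix_title_capitalization fix_title_capitalization_alt
  dsimp only
  cases hw : PySem.Str.split₀ (PySem.Str.lower title) with
  | nil => rfl
  | cons w ws =>
    rw [if_neg (by simp)]
    rw [pvAList_eq w ws]
    cases ws with
    | nil =>
      rw [if_neg (by simp)]
      simp only [PySem.List.pyGetD_neg_one (xs := [w]) (d := "") (List.cons_ne_nil w []), List.getLast_singleton]
      simp [PySem.Str.join, pvMid, pvCap, List.intercalate, PySem.Chars.join, PySem.List.slice]
    | cons x r =>
      rw [if_pos (by simp)]
      rw [pvSlice_one_negone w x r, List.foldl_reverse]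
      rw [PySem.List.pyGetD_zero_cons]
      simp only [PySem.List.pyGetD_neg_one (xs := w :: x :: r) (d := "") (List.cons_ne_nil w (x :: r))]
      rw [show (w :: x :: r).getLast (List.cons_ne_nil w (x :: r)) = (x :: r).getLast (List.cons_ne_nil x r) from
        List.getLast_cons (List.cons_ne_nil x r)]
      rw [← pvJoin_mid (x :: r) (by simp)]
      show String.ofList (PySem.Chars.join " ".toList
        ((pvCap w :: pvMid (x :: r)).map String.toList)) = _
      congr 1
      obtain ⟨y, ys, hy⟩ := List.exists_cons_of_ne_nil (pvMid_ne_nil x r)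
      rw [List.map_cons, hy, List.map_cons, PySem.Chars.join_cons_cons, ← List.map_cons, ← hy]
      simp [pvCap]
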